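-- pv_equiv track=rewrite | github.com/tadanghan898-bot/bypass-test | fetch_quick.py | is_framework_repo
-- ===== SOURCE A (Python) =====
-- def is_framework_repo(name, description=''):
--     """Skip repos that are clearly frameworks/boilerplates, not games."""
--     name_lower = name.lower()
--     desc_lower = (description or '').lower()
--
--     # These are frameworks, boilerplates, or non-game repos
--     skip_patterns = [
--         'starter', 'template', 'boilerplate', 'seed', 'scaffold',
--         'framework', 'engine', 'library', 'sdk', 'toolkit',
--         'demo', 'example', 'tutorial', 'lesson', 'course',
--         'playground', 'sandbox', 'experiment',
--     ]
--     skip_names = [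
--         'phaser-examples', 'phaser-tutorials', 'pixi-examples',
--         'three-examples', 'threejs-examples', 'game-engine',
--         'game-framework', 'game-library', 'html5-game-framework',
--     ]
--
--     for pat in skip_patterns:
--         if pat in name_lower and 'example' in name_lower:
--             return True
--     if name_lower in skip_names:
--         return True
--     return False
-- ===== SOURCE B (Python) =====
-- def is_framework_repo(name, description=''):
--     """Skip repos that are clearly frameworks/boilerplates, not games."""
--     name_lower = name.lower()
--     skip_names = [
--         'phaser-examples', 'phaser-tutorials', 'pixi-examples',
--         'three-examples', 'threejs-examples', 'game-engine',
--         'game-framework', 'game-library', 'html5-game-framework',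
--     ]
--     return 'example' in name_lower or name_lower in skip_names
-- ===== Notes on version B (the rewrite author's own statement) =====
-- stated objective: simpler
-- what changed: A's 18-pattern loop always additionally requires the substring example in the lowered name, and example is itself one of the patterns, so the loop collapses to that single substring test; B drops the pattern list, the loop and the unused description computation and returns that test or-ed with membership in skip_names.
import Mathlib
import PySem

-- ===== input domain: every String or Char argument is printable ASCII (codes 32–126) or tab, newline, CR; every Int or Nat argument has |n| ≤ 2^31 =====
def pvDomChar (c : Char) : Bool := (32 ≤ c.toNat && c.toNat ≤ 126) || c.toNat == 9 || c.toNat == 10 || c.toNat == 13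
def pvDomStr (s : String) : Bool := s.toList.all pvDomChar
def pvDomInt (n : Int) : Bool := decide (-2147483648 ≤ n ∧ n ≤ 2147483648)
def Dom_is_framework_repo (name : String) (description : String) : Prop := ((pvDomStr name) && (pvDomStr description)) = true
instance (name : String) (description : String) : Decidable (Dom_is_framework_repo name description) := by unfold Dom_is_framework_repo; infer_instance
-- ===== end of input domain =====

-- B drops A's 18-pattern loop (which always additionally requires 'example' in name_lower,
-- and 'example' is itself a pattern, so the loop equals that single substring test) and the
-- unused description computation: objective 'simpler'.

-- ===== PORT A =====
-- the 'for pat in skip_patterns:' loop of A, step for step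
def pvLoopA (name_lower : String) : List String → Bool
  | [] => false
  | pat :: rest =>
    if PySem.Str.isIn pat name_lower && PySem.Str.isIn "example" name_lower then true
    else pvLoopA name_lower rest

def is_framework_repo (name : String) (description : String) : Bool :=
  let name_lower := PySem.Str.lower name
  let _desc_lower := PySem.Str.lower (if description == "" then "" else description)  -- (description or '').lower(); unused
  let skip_patterns : List String :=
    ["starter", "template", "boilerplate", "seed", "scaffold",
     "framework", "engine", "library", "sdk", "toolkit",
     "demo", "example", "tutorial", "lesson", "course",
     "playground", "sandbox", "experiment"]
  let skip_names : List String :=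
    ["phaser-examples", "phaser-tutorials", "pixi-examples",
     "three-examples", "threejs-examples", "game-engine",
     "game-framework", "game-library", "html5-game-framework"]
  if pvLoopA name_lower skip_patterns then true
  else if skip_names.contains name_lower then true
  else false

-- ===== PORT B =====
def is_framework_repo_alt (name : String) (description : String) : Bool :=
  let name_lower := PySem.Str.lower name
  let skip_names : List String :=
    ["phaser-examples", "phaser-tutorials", "pixi-examples",
     "three-examples", "threejs-examples", "game-engine",
     "game-framework", "game-library", "html5-game-framework"]
  PySem.Str.isIn "example" name_lower || skip_names.contains name_lower

-- ===== PRECONDITION & SPEC =====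
def Spec_is_framework_repo (name : String) (description : String) (out : Bool) : Prop := out = is_framework_repo_alt name description
instance (name : String) (description : String) (out : Bool) : Decidable (Spec_is_framework_repo name description out) := by unfold Spec_is_framework_repo; infer_instance

-- ===== CLAIM (what is proved, stated in full; the proofs are below) =====
def Claim_equal_is_framework_repo : Prop := ∀ (name : String) (description : String), Dom_is_framework_repo name description → Spec_is_framework_repo name description (is_framework_repo name description)

-- ===== LEMMAS AND PROOFS =====

-- A's loop over the concrete pattern list reduces to the single 'example' substring test
theorem pvLoopA_eq (nl : String) :
    pvLoopA nl
      ["starter", "template", "boilerplate", "seed", "scaffold",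
       "framework", "engine", "library", "sdk", "toolkit",
       "demo", "example", "tutorial", "lesson", "course",
       "playground", "sandbox", "experiment"] = PySem.Str.isIn "example" nl := by
  by_cases h : PySem.Chars.isIn ['e','x','a','m','p','l','e'] nl.toList = true
  · simp [pvLoopA, h]
  · simp only [Bool.not_eq_true] at h
    simp [pvLoopA, h]

-- ===== VERDICT (by name: the statement is the Claim_ definition above) =====
theorem is_framework_repo_spec : Claim_equal_is_framework_repo := by
  intro name description _
  unfold Spec_is_framework_repo is_framework_repo is_framework_repo_alt
  simp only [pvLoopA_eq]
  cases h : PySem.Str.isIn "example" (PySem.Str.lower name) <;> simp
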